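-- pv_equiv track=rewrite | github.com/t-rasmud/ProjectDanceGesture | Our stuff/realtimegesturesegmentation/test_dance.py | calc_zero_crossings
-- ===== SOURCE A (Python) =====
-- def calc_zero_crossings(s):
--     # I could not get the speedier solutions to work reliably so here's a
--     # custom non-Pythony solution
--     cur_pt = s[0]
--     zero_crossings = []
--     for ind in range(1, len(s)):
--         next_pt = s[ind]
--
--         if ((next_pt < 0 and cur_pt > 0) or (next_pt > 0 and cur_pt < 0)):
--             zero_crossings.append(ind)
--         elif cur_pt == 0 and next_pt > 0:
--             # check for previous points less than 0
--             # as soon as tmp_pt is not zero, we are done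
--             tmp_pt = cur_pt
--             walk_back_idx = ind
--             while(tmp_pt == 0 and walk_back_idx > 0):
--                 walk_back_idx -= 1
--                 tmp_pt = s[walk_back_idx]
--
--             if tmp_pt < 0:
--                 zero_crossings.append(ind)
--         elif cur_pt == 0 and next_pt < 0:
--             # check for previous points greater than 0
--             # as soon as tmp_pt is not zero, we are done
--             tmp_pt = cur_pt
--             walk_back_idx = ind
--             while(tmp_pt == 0 and walk_back_idx > 0):
--                 walk_back_idx -= 1
--                 tmp_pt = s[walk_back_idx]
--
--             if tmp_pt > 0:
--                 zero_crossings.append(ind)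
--
--         cur_pt = s[ind]
--     return zero_crossings
-- ===== SOURCE B (Python) =====
-- def calc_zero_crossings(s):
--     # single pass: track the sign of the last nonzero value seen so far
--     last = (s[0] > 0) - (s[0] < 0)
--     zero_crossings = []
--     for ind, x in enumerate(s[1:], 1):
--         if x:
--             sg = (x > 0) - (x < 0)
--             if last and sg != last:
--                 zero_crossings.append(ind)
--             last = sg
--     return zero_crossings
-- ===== Notes on version B (the rewrite author's own statement) =====
-- stated objective: alternative
-- what changed: Replaced A's inner walk-back loop over preceding zeros by a single forward pass that tracks the sign of the last nonzero value seen so far.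
import Mathlib
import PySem

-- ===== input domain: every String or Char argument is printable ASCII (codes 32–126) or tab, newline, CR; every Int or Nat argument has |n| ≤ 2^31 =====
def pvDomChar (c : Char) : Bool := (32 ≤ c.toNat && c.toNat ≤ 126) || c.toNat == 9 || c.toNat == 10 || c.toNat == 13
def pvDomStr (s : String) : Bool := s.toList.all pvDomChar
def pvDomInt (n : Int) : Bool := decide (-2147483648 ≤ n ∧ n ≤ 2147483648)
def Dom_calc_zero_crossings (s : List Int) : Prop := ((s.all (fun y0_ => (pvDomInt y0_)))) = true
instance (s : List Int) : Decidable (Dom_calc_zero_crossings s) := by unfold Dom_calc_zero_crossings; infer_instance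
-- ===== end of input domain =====

-- B replaces A's inner walk-back over zero runs by a single forward pass that tracks
-- the sign of the last nonzero value seen so far (objective: alternative).

-- ===== PORT A =====
-- the inner 'while tmp_pt == 0 and walk_back_idx > 0' loop of A
-- (indices read are always in range, so pyGetD's default is never used)
def wbA (s : List Int) (tmp : Int) (idx : Int) : Int :=
  if h : tmp = 0 ∧ 0 < idx then wbA s (PySem.List.pyGetD s (idx - 1) 0) (idx - 1) else tmp
termination_by idx.toNat
decreasing_by omega

-- A's loop body: state = (cur_pt, zero_crossings)
def stepA (s : List Int) (st : Int × List Int) (ind : Int) : Int × List Int :=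
  let cur := st.1
  let zc := st.2
  let next := PySem.List.pyGetD s ind 0
  let zc' :=
    if (next < 0 ∧ cur > 0) ∨ (next > 0 ∧ cur < 0) then zc ++ [ind]
    else if cur = 0 ∧ next > 0 then
      (if wbA s cur ind < 0 then zc ++ [ind] else zc)
    else if cur = 0 ∧ next < 0 then
      (if wbA s cur ind > 0 then zc ++ [ind] else zc)
    else zc
  (next, zc')

def calc_zero_crossings (s : List Int) : List Int :=
  let cur0 := PySem.List.pyGetD s 0 0   -- s[0]; Pre_ excludes the empty list, where Python raises IndexError
  ((PySem.List.pyRange 1 (s.length : Int) 1).foldl (stepA s) (cur0, [])).2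

-- ===== PORT B =====
-- B's loop body: state = (last, zero_crossings); p = (ind, x) from enumerate(s[1:], 1)
def stepB (st : Int × List Int) (p : Int × Int) : Int × List Int :=
  let last := st.1
  let zc := st.2
  let x := p.2
  if x ≠ 0 then
    let sg : Int := (if x > 0 then 1 else 0) - (if x < 0 then 1 else 0)
    (sg, if last ≠ 0 ∧ sg ≠ last then zc ++ [p.1] else zc)
  else (last, zc)

def calc_zero_crossings_alt (s : List Int) : List Int :=
  let h := PySem.List.pyGetD s 0 0   -- s[0]; Pre_ excludes the empty list
  let last0 : Int := (if h > 0 then 1 else 0) - (if h < 0 then 1 else 0)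
  ((PySem.List.enumerate (PySem.List.slice s (some 1) none) 1).foldl stepB (last0, [])).2

-- ===== PRECONDITION & SPEC =====
-- Pre_ excludes only the empty list, on which A's 's[0]' raises IndexError.
def Pre_calc_zero_crossings (s : List Int) : Prop := s ≠ []
instance (s : List Int) : Decidable (Pre_calc_zero_crossings s) := by
  unfold Pre_calc_zero_crossings; infer_instance

def pvWitness_calc_zero_crossings : List Int := ([1, 0, -3, 2] : List Int)

def Spec_calc_zero_crossings (s : List Int) (out : List Int) : Prop := out = calc_zero_crossings_alt s
instance (s : List Int) (out : List Int) : Decidable (Spec_calc_zero_crossings s out) := by unfold Spec_calc_zero_crossings; infer_instance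

-- ===== CLAIM (what is proved, stated in full; the proofs are below) =====
def Claim_equal_calc_zero_crossings : Prop := ∀ (s : List Int), Dom_calc_zero_crossings s → Pre_calc_zero_crossings s → Spec_calc_zero_crossings s (calc_zero_crossings s)

-- ===== LEMMAS AND PROOFS =====

-- sign helper (proof-side only)
def sgn (x : Int) : Int := if 0 < x then 1 else if x < 0 then -1 else 0

-- sign of the last nonzero value among s[0..k] (0 if there is none)
def lastSign (s : List Int) : Nat → Int
  | 0 => sgn (s.getD 0 0)
  | k + 1 => if s.getD (k + 1) 0 = 0 then lastSign s k else sgn (s.getD (k + 1) 0)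

lemma sgn_eq_sub (x : Int) :
    ((if x > 0 then (1 : Int) else 0) - (if x < 0 then 1 else 0)) = sgn x := by
  unfold sgn; split_ifs <;> omega

lemma sgn_cases (x : Int) : sgn x = -1 ∨ sgn x = 0 ∨ sgn x = 1 := by
  unfold sgn; split_ifs <;> simp

lemma sgn_neg_iff (x : Int) : x < 0 ↔ sgn x = -1 := by
  unfold sgn
  split_ifs <;> constructor <;> intro h <;> first | omega | exact absurd h (by decide)

lemma sgn_pos_iff (x : Int) : 0 < x ↔ sgn x = 1 := by
  unfold sgn
  split_ifs <;> constructor <;> intro h <;> first | omega | exact absurd h (by decide)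

lemma lastSign_cases (s : List Int) (k : Nat) :
    lastSign s k = -1 ∨ lastSign s k = 0 ∨ lastSign s k = 1 := by
  induction k with
  | zero => exact sgn_cases _
  | succ k ih =>
      unfold lastSign
      split_ifs
      · exact ih
      · exact sgn_cases _

lemma lastSign_of_ne (s : List Int) (k : Nat) (h : s.getD k 0 ≠ 0) :
    lastSign s k = sgn (s.getD k 0) := by
  cases k with
  | zero => rfl
  | succ k => unfold lastSign; rw [if_neg h]

lemma wbA_stop (s : List Int) (tmp : Int) : wbA s tmp 0 = tmp := by
  rw [wbA, dif_neg (fun hc => absurd hc.2 (lt_irrefl 0))]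

lemma wbA_zero_step (s : List Int) (idx : Int) (h : 0 < idx) :
    wbA s 0 idx = if PySem.List.pyGetD s (idx - 1) 0 = 0
                  then wbA s 0 (idx - 1)
                  else PySem.List.pyGetD s (idx - 1) 0 := by
  rw [wbA, dif_pos ⟨rfl, h⟩]
  by_cases hg : PySem.List.pyGetD s (idx - 1) 0 = 0
  · rw [if_pos hg, hg]
  · rw [if_neg hg, wbA, dif_neg (fun hc => hg hc.1)]

-- the walk-back loop computes (the sign of) the last nonzero value of s[0..k]
lemma wbA_sgn (s : List Int) (k : Nat) :
    sgn (wbA s 0 ((k : Int) + 1)) = lastSign s k := by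
  induction k with
  | zero =>
      simp only [Nat.cast_zero, zero_add]
      rw [wbA_zero_step s 1 one_pos]
      have h10 : PySem.List.pyGetD s (1 - 1) 0 = s.getD 0 0 :=
        PySem.List.pyGetD_natCast s 0 0
      rw [h10]
      by_cases h : s.getD 0 0 = 0
      · rw [if_pos h, show (1 : Int) - 1 = 0 by norm_num, wbA_stop]
        show sgn 0 = lastSign s 0
        rw [show lastSign s 0 = sgn (s.getD 0 0) from rfl, h]
      · rw [if_neg h]
        rfl
  | succ k ih =>
      rw [wbA_zero_step s _ (by positivity)]
      rw [show ((k + 1 : Nat) : Int) + 1 - 1 = ((k + 1 : Nat) : Int) by ring,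
          PySem.List.pyGetD_natCast]
      unfold lastSign
      by_cases h : s.getD (k + 1) 0 = 0
      · rw [if_pos h, if_pos h,
            show ((k + 1 : Nat) : Int) = (k : Int) + 1 by push_cast; ring]
        exact ih
      · rw [if_neg h, if_neg h]

lemma stepA_acc_eq_stepB_acc (s : List Int) (k : Nat) (acc : List Int) :
    (stepA s (s.getD k 0, acc) ((k : Int) + 1)).2
      = (stepB (lastSign s k, acc) (((k : Int) + 1), s.getD (k + 1) 0)).2 := by
  unfold stepA stepB
  simp only
  have hpg : PySem.List.pyGetD s ((k : Int) + 1) 0 = s.getD (k + 1) 0 := by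
    rw [show ((k : Int) + 1) = ((k + 1 : Nat) : Int) by push_cast; ring,
        PySem.List.pyGetD_natCast]
  rw [hpg]
  set cur := s.getD k 0 with hcur
  set next := s.getD (k + 1) 0 with hnext
  by_cases hc : cur = 0
  · -- cur = 0: A uses the walk-back, whose sign is lastSign s k
    have hwb : sgn (wbA s cur ((k : Int) + 1)) = lastSign s k := by
      rw [hc]; exact wbA_sgn s k
    have hwbpos : 0 < wbA s cur ((k : Int) + 1) ↔ lastSign s k = 1 := by
      rw [sgn_pos_iff, hwb]
    have hwbneg : wbA s cur ((k : Int) + 1) < 0 ↔ lastSign s k = -1 := by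
      rw [sgn_neg_iff, hwb]
    rcases lt_trichotomy next 0 with hn | hn | hn
    · have hsg : sgn next = -1 := (sgn_neg_iff next).mp hn
      rw [sgn_eq_sub, hsg]
      rcases lastSign_cases s k with hl | hl | hl <;>
        [have hw := hwbpos.not.mpr (by omega);
         have hw := hwbpos.not.mpr (by omega);
         have hw := hwbpos.mpr hl] <;>
        split_ifs <;> first | rfl | omega
    · rw [sgn_eq_sub]
      split_ifs <;> first | rfl | omega
    · have hsg : sgn next = 1 := (sgn_pos_iff next).mp hn
      rw [sgn_eq_sub, hsg]
      rcases lastSign_cases s k with hl | hl | hl <;>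
        [have hw := hwbneg.mpr hl;
         have hw := hwbneg.not.mpr (by omega);
         have hw := hwbneg.not.mpr (by omega)] <;>
        split_ifs <;> first | rfl | omega
  · -- cur ≠ 0: B's last equals sgn cur
    have hl : lastSign s k = sgn cur := lastSign_of_ne s k hc
    rcases lt_trichotomy next 0 with hn | hn | hn <;>
      [rw [sgn_eq_sub, (sgn_neg_iff next).mp hn];
       rw [sgn_eq_sub];
       rw [sgn_eq_sub, (sgn_pos_iff next).mp hn]] <;>
      rcases lt_trichotomy cur 0 with hcc | hcc | hcc <;>
        first
        | omega
        | (rw [hl, (sgn_neg_iff cur).mp hcc]; split_ifs <;> first | rfl | omega)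
        | (rw [hl, (sgn_pos_iff cur).mp hcc]; split_ifs <;> first | rfl | omega)

lemma stepA_fst (s : List Int) (st : Int × List Int) (ind : Int) :
    (stepA s st ind).1 = PySem.List.pyGetD s ind 0 := rfl

lemma stepB_fst_eq (s : List Int) (k : Nat) (acc : List Int) :
    (stepB (lastSign s k, acc) (((k : Int) + 1), s.getD (k + 1) 0)).1
      = lastSign s (k + 1) := by
  unfold stepB
  simp only
  by_cases h : s.getD (k + 1) 0 = 0
  · rw [if_neg (fun hne => hne h), lastSign, if_pos h]
  · rw [if_pos h]
    simp only
    rw [sgn_eq_sub, lastSign, if_neg h]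

lemma main_fold (s : List Int) (m : Nat) :
    ∀ (k : Nat) (acc : List Int), k < s.length → m = s.length - (k + 1) →
    ((PySem.List.pyRange ((k : Int) + 1) (s.length : Int) 1).foldl (stepA s) (s.getD k 0, acc)).2
      = ((PySem.List.enumerate (s.drop (k + 1)) ((k : Int) + 1)).foldl stepB (lastSign s k, acc)).2 := by
  induction m with
  | zero =>
      intro k acc hk hm
      have hlen : s.length ≤ k + 1 := by omega
      rw [PySem.List.pyRange_one_eq_nil (by exact_mod_cast hlen),
          List.drop_eq_nil_of_le hlen]
      rfl
  | succ m ih =>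
      intro k acc hk hm
      have hk1 : k + 1 < s.length := by omega
      rw [PySem.List.pyRange_one_cons (by exact_mod_cast hk1)]
      have hdrop : s.drop (k + 1) = s[k + 1] :: s.drop (k + 2) :=
        List.drop_eq_getElem_cons hk1
      rw [hdrop, PySem.List.enumerate_cons]
      simp only [List.foldl_cons]
      have hget : s[k + 1] = s.getD (k + 1) 0 := (List.getD_eq_getElem s 0 hk1).symm
      rw [hget]
      have hA : stepA s (s.getD k 0, acc) ((k : Int) + 1)
          = (s.getD (k + 1) 0, (stepA s (s.getD k 0, acc) ((k : Int) + 1)).2) := by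
        rw [Prod.ext_iff]
        refine ⟨?_, rfl⟩
        rw [stepA_fst, show ((k : Int) + 1) = ((k + 1 : Nat) : Int) by push_cast; ring,
            PySem.List.pyGetD_natCast]
      have hB : stepB (lastSign s k, acc) (((k : Int) + 1), s.getD (k + 1) 0)
          = (lastSign s (k + 1), (stepA s (s.getD k 0, acc) ((k : Int) + 1)).2) := by
        rw [Prod.ext_iff]
        exact ⟨stepB_fst_eq s k acc, (stepA_acc_eq_stepB_acc s k acc).symm⟩
      rw [hA, hB]
      have := ih (k + 1) ((stepA s (s.getD k 0, acc) ((k : Int) + 1)).2) hk1 (by omega)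
      rw [show (((k + 1 : Nat) : Int) + 1) = ((k : Int) + 1 + 1) by push_cast; ring] at this
      rw [show (k + 1 + 1) = k + 2 by ring] at this
      exact this

-- ===== VERDICT (by name: the statement is the Claim_ definition above) =====
theorem calc_zero_crossings_spec : Claim_equal_calc_zero_crossings := by
  intro s _ hpre
  unfold Spec_calc_zero_crossings calc_zero_crossings calc_zero_crossings_alt
  simp only
  have hlen : 0 < s.length := List.length_pos_of_ne_nil hpre
  have hg : PySem.List.pyGetD s 0 0 = s.getD 0 0 := PySem.List.pyGetD_natCast s 0 0
  rw [PySem.List.slice_from s (by norm_num : (0 : Int) ≤ 1), hg, sgn_eq_sub,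
      show sgn (s.getD 0 0) = lastSign s 0 from rfl]
  have hmain := main_fold s (s.length - 1) 0 [] hlen (by omega)
  simp only [Nat.cast_zero, zero_add] at hmain
  exact hmain
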